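-- pv_equiv track=rewrite | github.com/PetarDjurdjic/Petar-projekti | Biology Meets Programming Bioinformatics for Beginners/Week 2/8.maximum_skew.py | maximumSkew
-- ===== SOURCE A (Python) =====
-- def maximumSkew(Genome):
--     positions = []
--     skew = SkewArray(Genome)
--     min = sorted(skew)
--     for i in range(len(skew)):
--         if skew[i] == min[-1]:
--             positions.append(i)
--     return positions
--
-- def SkewArray(Genome):
--     skew_list = [0]
--     skew_sum = 0
--     for i in Genome:
--         if i == "G":
--             skew_sum +=1
--             skew_list.append(skew_sum)
--         elif i == "C":
--             skew_sum -=1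
--             skew_list.append(skew_sum)
--         else:
--             skew_list.append(skew_sum)
--     return skew_list
-- ===== SOURCE B (Python) =====
-- def maximumSkew(Genome):
--     skew = 0
--     best = 0
--     positions = [0]
--     for i, ch in enumerate(Genome, 1):
--         if ch == "G":
--             skew += 1
--         elif ch == "C":
--             skew -= 1
--         if skew > best:
--             best = skew
--             positions = [i]
--         elif skew == best:
--             positions.append(i)
--     return positions
-- ===== Notes on version B (the rewrite author's own statement) =====
-- stated objective: alternative
-- what changed: Replaced build-skew-array + sort + second indexing pass with a single streaming pass that updates the running skew, running maximum and the list of argmax positions in one loop.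
import Mathlib
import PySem

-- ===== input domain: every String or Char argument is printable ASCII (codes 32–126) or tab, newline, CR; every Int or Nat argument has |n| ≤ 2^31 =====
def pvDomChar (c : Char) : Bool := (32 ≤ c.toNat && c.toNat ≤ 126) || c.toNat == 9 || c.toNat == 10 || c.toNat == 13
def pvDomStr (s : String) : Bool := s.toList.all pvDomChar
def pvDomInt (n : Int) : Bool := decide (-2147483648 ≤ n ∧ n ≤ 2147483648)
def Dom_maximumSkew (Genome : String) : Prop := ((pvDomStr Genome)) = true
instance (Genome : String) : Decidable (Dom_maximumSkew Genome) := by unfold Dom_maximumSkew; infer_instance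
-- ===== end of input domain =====

-- B fuses skew-array construction, max-finding and index collection into one streaming pass
-- (no intermediate skew list, no sort); objective: alternative (single-pass algorithm).


-- ===== PORT A =====
-- SkewArray: builds [0] then appends the running skew after each character.
def skewArrayA (cs : List Char) : List Int :=
  (cs.foldl
    (fun (st : List Int × Int) i =>
      if i == 'G' then (st.1 ++ [st.2 + 1], st.2 + 1)
      else if i == 'C' then (st.1 ++ [st.2 - 1], st.2 - 1)
      else (st.1 ++ [st.2], st.2))
    ([0], 0)).1

-- maximumSkew: sorts the skew array, takes min[-1] (its last = maximum), then collects
-- every index i with skew[i] == min[-1]. skewArrayA is never empty (it starts as [0]),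
-- so the pyGetD defaults below are never used: both indexings are exact.
def maximumSkew (Genome : String) : List Int :=
  let skew := skewArrayA Genome.toList
  let mn := PySem.List.sorted skew (fun x => x)
  let m := PySem.List.pyGetD mn (-1) 0
  (PySem.List.pyRange 0 (skew.length : Int)).foldl
    (fun positions i => if PySem.List.pyGetD skew i 0 == m then positions ++ [i] else positions) []

-- ===== PORT B =====
-- one streaming pass: i is the 1-based position, skew the running skew, best the running
-- maximum, positions the positions of best so far (seeded with [0] for the prepended 0).
def altLoop : List Char → Int → Int → Int → List Int → List Int
  | [], _, _, _, positions => positions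
  | ch :: rest, i, skew, best, positions =>
    let skew' := if ch == 'G' then skew + 1 else if ch == 'C' then skew - 1 else skew
    if best < skew' then altLoop rest (i + 1) skew' skew' [i]
    else if skew' == best then altLoop rest (i + 1) skew' best (positions ++ [i])
    else altLoop rest (i + 1) skew' best positions

def maximumSkew_alt (Genome : String) : List Int :=
  altLoop Genome.toList 1 0 0 [0]

-- ===== PRECONDITION & SPEC =====
def Spec_maximumSkew (Genome : String) (out : List Int) : Prop := out = maximumSkew_alt Genome
instance (Genome : String) (out : List Int) : Decidable (Spec_maximumSkew Genome out) := by unfold Spec_maximumSkew; infer_instance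

-- ===== CLAIM (what is proved, stated in full; the proofs are below) =====
def Claim_equal_maximumSkew : Prop := ∀ (Genome : String), Dom_maximumSkew Genome → Spec_maximumSkew Genome (maximumSkew Genome)

-- ===== LEMMAS AND PROOFS =====

-- the skew values after each character (skew array without its leading 0)
def skewTail (s : Int) : List Char → List Int
  | [] => []
  | c :: cs =>
    (if c == 'G' then s + 1 else if c == 'C' then s - 1 else s) ::
      skewTail (if c == 'G' then s + 1 else if c == 'C' then s - 1 else s) cs

-- indices (i, i+1, …) of entries of vs equal to M
def idxF : List Int → Int → Int → List Int
  | [], _, _ => []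
  | v :: vs, i, M => if v = M then i :: idxF vs (i + 1) M else idxF vs (i + 1) M

theorem skewArrayA_fold (cs : List Char) (lst : List Int) (s : Int) :
    (cs.foldl
      (fun (st : List Int × Int) i =>
        if i == 'G' then (st.1 ++ [st.2 + 1], st.2 + 1)
        else if i == 'C' then (st.1 ++ [st.2 - 1], st.2 - 1)
        else (st.1 ++ [st.2], st.2))
      (lst ++ [s], s)).1 = lst ++ s :: skewTail s cs := by
  induction cs generalizing lst s with
  | nil => simp [skewTail]
  | cons c cs ih =>
    simp only [List.foldl_cons, skewTail]
    by_cases hG : c == 'G'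
    · simpa [hG, List.append_assoc] using ih (lst ++ [s]) (s + 1)
    · by_cases hC : c == 'C'
      · simpa [hG, hC, List.append_assoc] using ih (lst ++ [s]) (s - 1)
      · simpa [hG, hC, List.append_assoc] using ih (lst ++ [s]) s

theorem skewArrayA_eq (cs : List Char) : skewArrayA cs = 0 :: skewTail 0 cs := by
  unfold skewArrayA
  simpa using skewArrayA_fold cs [] 0

-- min[-1] of sorted(ys) is the maximum of ys (ys = 0 :: xs here)
theorem sorted_last_eq_max (xs : List Int) :
    PySem.List.pyGetD (PySem.List.sorted (0 :: xs) (fun x => x)) (-1) 0 = xs.foldl max 0 := by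
  set ys := PySem.List.sorted (0 :: xs) (fun x => x) with hys
  have hlen : ys.length = xs.length + 1 := by
    simp [hys, PySem.List.length_sorted]
  have hpos : 0 < ys.length := by omega
  have hL : PySem.List.pyGetD ys (-1) 0 = ys[ys.length - 1]'(by omega) := by
    simp [PySem.List.pyGetD, PySem.List.pyGet?, PySem.List.pyIdx?, hlen]
  rw [hL]
  set L := ys[ys.length - 1]'(by omega) with hLdef
  have hLmem : L ∈ (0 : Int) :: xs := by
    rw [← PySem.List.mem_sorted (0 :: xs) (fun x => x) false L, ← hys]
    exact List.getElem_mem _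
  have hLub : ∀ y ∈ (0 : Int) :: xs, y ≤ L := by
    intro y hy
    rw [← PySem.List.mem_sorted (0 :: xs) (fun x => x) false y, ← hys] at hy
    obtain ⟨p, hp, hpy⟩ := List.getElem_of_mem hy
    have hl2 : (PySem.List.sorted (0 :: xs) fun x => x).length = ys.length := by rw [hys]
    rw [← hpy]
    exact PySem.List.sorted_id_getElem_mono (0 :: xs) (by omega) (by omega)
  have hMub := PySem.List.le_foldl_max xs (0 : Int)
  have hMmem : xs.foldl max 0 ∈ (0 : Int) :: xs := by
    rcases PySem.List.foldl_max_mem xs (0 : Int) with h | h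
    · rw [h]; exact List.mem_cons_self
    · exact List.mem_cons_of_mem _ h
  refine le_antisymm ?_ (hLub _ hMmem)
  rcases List.mem_cons.mp hLmem with h | h
  · rw [h]; exact hMub.1
  · exact hMub.2 L h

theorem idxF_range (ys : List Int) (M : Int) (a : Nat) :
    idxF ys (a : Int) M =
      ((List.range ys.length).filter (fun k => ys.getD k 0 == M)).map (fun k => ((k + a : Nat) : Int)) := by
  induction ys generalizing a with
  | nil => simp [idxF]
  | cons v vs ih =>
    have hcast : (a : Int) + 1 = ((a + 1 : Nat) : Int) := by push_cast; ring
    rw [List.length_cons, List.range_succ_eq_map, List.filter_cons]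
    simp only [List.getD_cons_zero, List.getD_cons_succ, List.filter_map, Function.comp_def,
      Nat.succ_eq_add_one]
    by_cases hv : v = M
    · rw [idxF, if_pos hv, hcast, ih (a + 1)]
      simp only [hv, beq_self_eq_true, if_pos, List.map_cons, List.map_map, Function.comp_def]
      rw [Nat.zero_add]
      refine congrArg₂ _ rfl (List.map_congr_left fun k _ => ?_)
      congr 1
      omega
    · rw [idxF, if_neg hv, hcast, ih (a + 1)]
      have hvb : ((v == M) : Bool) = false := by simpa using hv
      simp only [hvb, Bool.false_eq_true, if_false, List.map_map, Function.comp_def]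
      refine List.map_congr_left fun k _ => ?_
      congr 1
      omega

-- the index-collecting loop of A, written over the skew list ys
theorem pyRange_filter_eq_idxF (ys : List Int) (M : Int) :
    (PySem.List.pyRange 0 (ys.length : Int)).filter (fun t => PySem.List.pyGetD ys t 0 == M) =
      idxF ys 0 M := by
  rw [PySem.List.pyRange_zero_natCast, List.filter_map]
  have h0 : idxF ys ((0 : Nat) : Int) M =
      ((List.range ys.length).filter (fun k => ys.getD k 0 == M)).map (fun k => ((k + 0 : Nat) : Int)) :=
    idxF_range ys M 0
  simp only [Nat.add_zero, Nat.cast_zero] at h0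
  rw [h0]
  congr 1
  refine List.filter_congr fun k _ => ?_
  simp [PySem.List.pyGetD_natCast]

theorem altLoop_eq (cs : List Char) (i s best : Int) (pos : List Int) :
    altLoop cs i s best pos =
      if best < (skewTail s cs).foldl max best
      then idxF (skewTail s cs) i ((skewTail s cs).foldl max best)
      else pos ++ idxF (skewTail s cs) i best := by
  induction cs generalizing i s best pos with
  | nil => simp [altLoop, skewTail, idxF]
  | cons c cs ih =>
    set s' : Int := if c == 'G' then s + 1 else if c == 'C' then s - 1 else s with hs'
    have hunf : altLoop (c :: cs) i s best pos =
        (if best < s' then altLoop cs (i + 1) s' s' [i]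
         else if s' == best then altLoop cs (i + 1) s' best (pos ++ [i])
         else altLoop cs (i + 1) s' best pos) := by
      simp [altLoop, hs']
    have htail : skewTail s (c :: cs) = s' :: skewTail s' cs := by
      simp [skewTail, hs']
    have hub := PySem.List.le_foldl_max (skewTail s' cs) (max best s')
    rw [hunf, htail, List.foldl_cons]
    by_cases h1 : best < s'
    · -- reset branch: max best s' = s'
      have hm : max best s' = s' := max_eq_right h1.le
      rw [if_pos h1, ih (i + 1) s' s' [i]]
      have hub' := PySem.List.le_foldl_max (skewTail s' cs) s'
      rw [hm] at hub ⊢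
      have hb : best < (skewTail s' cs).foldl max s' := lt_of_lt_of_le h1 hub'.1
      rw [if_pos hb]
      by_cases h2 : s' < (skewTail s' cs).foldl max s'
      · rw [if_pos h2]
        have : s' ≠ (skewTail s' cs).foldl max s' := ne_of_lt h2
        simp [idxF, this]
      · rw [if_neg h2]
        have heq : (skewTail s' cs).foldl max s' = s' := le_antisymm (not_lt.mp h2) hub'.1
        simp [idxF, heq]
    · -- no-reset: max best s' = best
      have hm : max best s' = best := max_eq_left (not_lt.mp h1)
      rw [hm] at hub ⊢
      by_cases h2 : s' == best
      · have h2' : s' = best := by simpa using h2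
        rw [if_neg h1, if_pos h2, ih (i + 1) s' best (pos ++ [i])]
        set F := (skewTail s' cs).foldl max best with hF
        by_cases h3 : best < F
        · rw [if_pos h3, if_pos h3]
          have hne : s' ≠ F := by rw [h2']; exact ne_of_lt h3
          simp [idxF, hne]
        · rw [if_neg h3, if_neg h3]
          have heq : (skewTail s' cs).foldl max best = best := le_antisymm (not_lt.mp h3) hub.1
          simp [idxF, h2']
      · have h2' : s' ≠ best := by simpa using h2
        have hlt : s' < best := lt_of_le_of_ne (not_lt.mp h1) h2'
        rw [if_neg h1, if_neg h2, ih (i + 1) s' best pos]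
        by_cases h3 : best < (skewTail s' cs).foldl max best
        · rw [if_pos h3, if_pos h3]
          have : s' ≠ (skewTail s' cs).foldl max best := ne_of_lt (lt_trans hlt h3)
          simp [idxF, this]
        · rw [if_neg h3, if_neg h3]
          simp [idxF, h2']

-- ===== VERDICT (by name: the statement is the Claim_ definition above) =====
theorem maximumSkew_spec : Claim_equal_maximumSkew := by
  intro G _
  show maximumSkew G = maximumSkew_alt G
  unfold maximumSkew maximumSkew_alt
  simp only [skewArrayA_eq, sorted_last_eq_max]
  rw [PySem.List.foldl_append_if_eq_filter, List.nil_append, pyRange_filter_eq_idxF,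
    altLoop_eq]
  set xs := skewTail 0 G.toList with hxs
  set F := xs.foldl max 0 with hF
  have h0F : 0 ≤ F := (PySem.List.le_foldl_max xs 0).1
  by_cases h : 0 < F
  · rw [if_pos h]
    have hne : (0 : Int) ≠ F := ne_of_lt h
    simp [idxF, hne]
  · rw [if_neg h]
    have hF0 : F = 0 := le_antisymm (not_lt.mp h) h0F
    simp [idxF, hF0]
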